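-- pv_equiv track=rewrite | github.com/varunkudva/python101 | Companies/iterable.py | phone_calls_brute_force
-- ===== SOURCE A (Python) =====
-- class Call:
--     def __init__(self, start, end, volume):
--         self.start = start
--         self.end = end
--         self.volume = volume
--
--     def __lt__(self, other):
--         return self.start < other.start
--
--     def __repr__(self):
--         return "({},{},{})".format(self.start, self.end, self.volume)
--
-- def phone_calls_brute_force(start, duration, volume):
--     end = [start[i] + duration[i] for i in range(len(start))]
--     calls = []
--     for s, e, v in zip(start, end, volume):
--         calls.append(Call(s, e, v))
--
--     def overlapping(c1, c2):
--         return c1.start < c2.end and c2.start < c1.end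
--
--     # sort based on start time
--     calls = sorted(calls)
--     max_volume, cur_volume = 0, 0
--     """
--     O(n2) brute force solution. pick every interval and combine with other non
--     overlapping intervals. Finally pick the max of all the combinations
--     """
--     for i in range(len(calls)):
--         cur_volume = calls[i].volume
--         last_index = i
--         for j in range(i + 1, len(calls)):
--             if not overlapping(calls[last_index], calls[j]):
--                 last_index = j
--                 cur_volume += calls[j].volume
--         max_volume = max(max_volume, cur_volume)
--
--     return max_volume
-- ===== SOURCE B (Python) =====
-- def phone_calls_brute_force(start, duration, volume):
--     end = [s + d for s, d in zip(start, duration)]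
--     calls = sorted(zip(start, end, volume), key=lambda c: c[0])
--     best = 0
--     # tail holds (call, chain_volume) for the already-processed suffix,
--     # nearest successor LAST; chain volumes are shared (computed once each).
--     tail = []
--     for c in reversed(calls):
--         s, e, v = c
--         g = v
--         for (s2, e2, _), g2 in reversed(tail):
--             if not (s < e2 and s2 < e):
--                 g += g2
--                 break
--         tail.append((c, g))
--         best = max(best, g)
--     return best
-- ===== Notes on version B (the rewrite author's own statement) =====
-- stated objective: faster
-- what changed: Instead of re-running the whole greedy chain scan for every starting interval (nested forward loops), B sweeps the sorted calls once right-to-left, memoizing each interval's chain volume and only scanning forward to the FIRST non-overlapping successor, whose already-computed chain volume is reused.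
import Mathlib
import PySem

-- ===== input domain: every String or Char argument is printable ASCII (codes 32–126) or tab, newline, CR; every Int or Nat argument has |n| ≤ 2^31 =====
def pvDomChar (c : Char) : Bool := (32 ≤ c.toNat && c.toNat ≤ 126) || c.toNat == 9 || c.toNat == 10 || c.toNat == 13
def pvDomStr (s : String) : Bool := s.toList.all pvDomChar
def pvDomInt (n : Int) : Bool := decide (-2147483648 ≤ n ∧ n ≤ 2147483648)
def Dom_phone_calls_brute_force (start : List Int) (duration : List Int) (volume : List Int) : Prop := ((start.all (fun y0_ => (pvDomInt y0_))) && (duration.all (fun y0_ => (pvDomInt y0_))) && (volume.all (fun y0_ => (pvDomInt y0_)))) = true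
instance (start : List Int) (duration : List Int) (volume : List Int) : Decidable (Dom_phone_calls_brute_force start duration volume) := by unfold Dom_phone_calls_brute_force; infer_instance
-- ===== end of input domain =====

-- B replaces A's per-start re-scan of the whole greedy chain by one right-to-left sweep
-- that memoizes each interval's chain volume (objective: faster re-use of shared chain tails).

-- ===== PORT A =====
-- body of A's inner j-loop (last_index, cur_volume as the pair state)
def pvStepA (calls : List (Int × Int × Int)) (p : Int × Int) (j : Int) : Int × Int :=
  let cl := PySem.List.pyGetD calls p.1 (0, 0, 0)
  let cj := PySem.List.pyGetD calls j (0, 0, 0)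
  if ¬ (cl.1 < cj.2.1 ∧ cj.1 < cl.2.1) then (j, p.2 + cj.2.2) else p

def phone_calls_brute_force (start : List Int) (duration : List Int) (volume : List Int) : Int :=
  let endl := (PySem.List.pyRange 0 start.length 1).map
    (fun i => PySem.List.pyGetD start i 0 + PySem.List.pyGetD duration i 0)  -- start[i]+duration[i]; Pre_ makes the indexing in-range
  let calls0 := ((start.zip endl).zip volume).map (fun p => (p.1.1, p.1.2, p.2))
  let calls := PySem.List.sorted calls0 (fun c => c.1) false
  let n : Int := calls.length
  (PySem.List.pyRange 0 n 1).foldl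
    (fun maxv i =>
      let st := (PySem.List.pyRange (i + 1) n 1).foldl (pvStepA calls)
        (i, (PySem.List.pyGetD calls i (0, 0, 0)).2.2)
      max maxv st.2)
    0

-- ===== PORT B =====
-- one reversed-sweep step of Source B: compute this call's chain volume from the memoized tail
def pvAltStep (c : Int × Int × Int) (st : List ((Int × Int × Int) × Int) × Int) :
    List ((Int × Int × Int) × Int) × Int :=
  let g := c.2.2 +
    (match st.1.find? (fun p => !decide (c.1 < p.1.2.1 ∧ p.1.1 < c.2.1)) with
     | some p => p.2
     | none => 0)
  ((c, g) :: st.1, max st.2 g)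

def phone_calls_brute_force_alt (start : List Int) (duration : List Int) (volume : List Int) : Int :=
  let endl := List.zipWith (· + ·) start duration
  let calls := PySem.List.sorted
    (((start.zip endl).zip volume).map (fun p => (p.1.1, p.1.2, p.2))) (fun c => c.1) false
  (calls.foldr pvAltStep ([], 0)).2

-- ===== PRECONDITION & SPEC =====
-- A's end-list comprehension indexes duration[i] for every i < len(start): it raises IndexError iff duration is shorter.
def Pre_phone_calls_brute_force (start : List Int) (duration : List Int) (volume : List Int) : Prop :=
  start.length ≤ duration.length
instance (start : List Int) (duration : List Int) (volume : List Int) : Decidable (Pre_phone_calls_brute_force start duration volume) := by unfold Pre_phone_calls_brute_force; infer_instance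
def pvWitness_phone_calls_brute_force : List Int × List Int × List Int := ([1, 5, 2], [3, 1, 2], [4, 1, 7])

def Spec_phone_calls_brute_force (start : List Int) (duration : List Int) (volume : List Int) (out : Int) : Prop := out = phone_calls_brute_force_alt start duration volume
instance (start : List Int) (duration : List Int) (volume : List Int) (out : Int) : Decidable (Spec_phone_calls_brute_force start duration volume out) := by unfold Spec_phone_calls_brute_force; infer_instance

-- ===== CLAIM (what is proved, stated in full; the proofs are below) =====
def Claim_equal_phone_calls_brute_force : Prop := ∀ (start : List Int) (duration : List Int) (volume : List Int), Dom_phone_calls_brute_force start duration volume → Pre_phone_calls_brute_force start duration volume → Spec_phone_calls_brute_force start duration volume (phone_calls_brute_force start duration volume)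
-- ===== LEMMAS AND PROOFS =====

-- greedy chain volume collected after a fixed last call c over the remaining list
def pvChain : Int × Int × Int → List (Int × Int × Int) → Int
  | _, [] => 0
  | c, d :: t => if ¬ (c.1 < d.2.1 ∧ d.1 < c.2.1) then d.2.2 + pvChain d t else pvChain c t

-- the memo table Source B's sweep builds: each call paired with its full chain volume
def pvPairs : List (Int × Int × Int) → List ((Int × Int × Int) × Int)
  | [] => []
  | c :: t => (c, c.2.2 + pvChain c t) :: pvPairs t

def pvBest : List (Int × Int × Int) → Int
  | [] => 0
  | c :: t => max (pvBest t) (c.2.2 + pvChain c t)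

lemma pvFind_pairs (c : Int × Int × Int) (t : List (Int × Int × Int)) :
    (match (pvPairs t).find? (fun p => !decide (c.1 < p.1.2.1 ∧ p.1.1 < c.2.1)) with
     | some p => p.2
     | none => 0) = pvChain c t := by
  induction t with
  | nil => simp [pvPairs, pvChain]
  | cons d t ih =>
    by_cases h : c.1 < d.2.1 ∧ d.1 < c.2.1
    · rw [pvPairs, List.find?_cons_of_neg (by simp [h]), pvChain,
        if_neg (by simpa using h)]
      exact ih
    · rw [pvPairs, List.find?_cons_of_pos (by simp [h])]
      simp [pvChain, h]

lemma pvFoldr_alt (L : List (Int × Int × Int)) :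
    L.foldr pvAltStep ([], 0) = (pvPairs L, pvBest L) := by
  induction L with
  | nil => rfl
  | cons c t ih =>
    simp only [List.foldr, ih, pvAltStep, pvPairs, pvBest, pvFind_pairs]

lemma pv_get_nat (calls : List (Int × Int × Int)) (a : Nat) (h : a < calls.length) :
    PySem.List.pyGetD calls ((a : Int)) (0, 0, 0) = calls[a] := by
  rw [PySem.List.pyGetD_natCast]
  simp [List.getD_eq_getElem?_getD, List.getElem?_eq_getElem h]

lemma pv_cast_succ (a : Nat) : ((a : Int) + 1) = ((a + 1 : Nat) : Int) := by push_cast; ring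

lemma pv_step_eval (calls : List (Int × Int × Int)) (last a : Nat)
    (hl : last < calls.length) (ha : a < calls.length) (cur : Int) :
    pvStepA calls ((last : Int), cur) ((a : Int))
      = if ¬ ((calls[last]).1 < (calls[a]).2.1 ∧ (calls[a]).1 < (calls[last]).2.1)
        then ((a : Int), cur + (calls[a]).2.2) else ((last : Int), cur) := by
  unfold pvStepA
  rw [pv_get_nat calls a ha, pv_get_nat calls last hl]

lemma pv_inner_eq (calls : List (Int × Int × Int)) :
    ∀ (m a : Nat), a + m = calls.length →
    ∀ (last : Nat) (hl : last < calls.length), ∀ (cur : Int),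
    ((PySem.List.pyRange (a : Int) (calls.length : Int) 1).foldl (pvStepA calls)
      ((last : Int), cur)).2
    = cur + pvChain calls[last] (calls.drop a) := by
  intro m
  induction m with
  | zero =>
    intro a ha last hl cur
    have h1 : (a : Int) = (calls.length : Int) := by omega
    rw [h1, PySem.List.pyRange_one_eq_nil (le_refl _)]
    have h2 : calls.drop a = [] := by apply List.drop_eq_nil_of_le; omega
    simp [h2, pvChain]
  | succ m ih =>
    intro a ha last hl cur
    have haL : a < calls.length := by omega
    have hr : PySem.List.pyRange (a : Int) (calls.length : Int) 1
        = (a : Int) :: PySem.List.pyRange ((a + 1 : Nat) : Int) (calls.length : Int) 1 := by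
      rw [PySem.List.pyRange_one_cons (by exact_mod_cast haL), pv_cast_succ]
    have hd : calls.drop a = calls[a] :: calls.drop (a + 1) :=
      List.drop_eq_getElem_cons haL
    rw [hr, hd, List.foldl_cons, pv_step_eval calls last a hl haL cur]
    by_cases h : (calls[last]).1 < (calls[a]).2.1 ∧ (calls[a]).1 < (calls[last]).2.1
    · rw [if_neg (not_not_intro h)]
      rw [ih (a + 1) (by omega) last hl cur]
      simp only [pvChain]
      rw [if_neg (not_not_intro h)]
    · rw [if_pos h]
      rw [ih (a + 1) (by omega) a haL (cur + (calls[a]).2.2)]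
      simp only [pvChain]
      rw [if_pos h]
      ring

def pvVals : List (Int × Int × Int) → List Int
  | [] => []
  | c :: t => (c.2.2 + pvChain c t) :: pvVals t

lemma pv_outer_eq (calls : List (Int × Int × Int)) :
    ∀ (m a : Nat), a + m = calls.length → ∀ (acc : Int),
    (PySem.List.pyRange (a : Int) (calls.length : Int) 1).foldl
      (fun maxv i =>
        let st := (PySem.List.pyRange (i + 1) (calls.length : Int) 1).foldl (pvStepA calls)
          (i, (PySem.List.pyGetD calls i (0, 0, 0)).2.2)
        max maxv st.2)
      acc
    = (pvVals (calls.drop a)).foldl max acc := by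
  intro m
  induction m with
  | zero =>
    intro a ha acc
    have h1 : (a : Int) = (calls.length : Int) := by omega
    rw [h1, PySem.List.pyRange_one_eq_nil (le_refl _)]
    have h2 : calls.drop a = [] := by apply List.drop_eq_nil_of_le; omega
    simp [h2, pvVals]
  | succ m ih =>
    intro a ha acc
    have haL : a < calls.length := by omega
    have hr : PySem.List.pyRange (a : Int) (calls.length : Int) 1
        = (a : Int) :: PySem.List.pyRange ((a + 1 : Nat) : Int) (calls.length : Int) 1 := by
      rw [PySem.List.pyRange_one_cons (by exact_mod_cast haL), pv_cast_succ]
    have hd : calls.drop a = calls[a] :: calls.drop (a + 1) :=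
      List.drop_eq_getElem_cons haL
    rw [hr, hd, List.foldl_cons]
    simp only [pv_get_nat calls a haL, pv_cast_succ,
      pv_inner_eq calls m (a + 1) (by omega) a haL ((calls[a]).2.2)]
    simp only [pvVals, List.foldl_cons]
    exact ih (a + 1) (by omega) _

lemma pv_foldl_max_shift (l : List Int) : ∀ (m x : Int),
    l.foldl max (max m x) = max (l.foldl max m) x := by
  induction l with
  | nil => intro m x; rfl
  | cons y t ih =>
    intro m x
    simp only [List.foldl_cons]
    rw [show max (max m x) y = max (max m y) x by
      rcases le_total m x with h | h <;> rcases le_total m y with h2 | h2 <;>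
        rcases le_total x y with h3 | h3 <;> simp [max_def] <;> omega]
    exact ih (max m y) x

lemma pv_best_eq_foldl (L : List (Int × Int × Int)) :
    pvBest L = (pvVals L).foldl max 0 := by
  induction L with
  | nil => rfl
  | cons c t ih =>
    simp only [pvBest, pvVals, List.foldl_cons, ih]
    rw [pv_foldl_max_shift (pvVals t) 0 (c.2.2 + pvChain c t)]

-- under Pre_, A's index-built end list equals B's zipWith end list
lemma pv_end_eq (start duration : List Int) (h : start.length ≤ duration.length) :
    (PySem.List.pyRange 0 start.length 1).map
      (fun i => PySem.List.pyGetD start i 0 + PySem.List.pyGetD duration i 0)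
    = List.zipWith (· + ·) start duration := by
  apply List.ext_getElem
  · simp [PySem.List.length_pyRange_one]; omega
  · intro k h1 h2
    have hk : k < start.length := by
      have h2' := h2
      simp [List.length_zipWith] at h2'
      omega
    have hk2 : k < duration.length := by omega
    have : ((PySem.List.pyRange 0 (start.length : Int) 1).map
        (fun i => PySem.List.pyGetD start i 0 + PySem.List.pyGetD duration i 0))[k]'h1
        = PySem.List.pyGetD start ((0 : Int) + k) 0 + PySem.List.pyGetD duration ((0 : Int) + k) 0 := by
      simp only [List.getElem_map, PySem.List.getElem_pyRange_one]
    rw [this]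
    simp only [zero_add, PySem.List.pyGetD_natCast, List.getElem_zipWith,
      List.getD_eq_getElem?_getD, List.getElem?_eq_getElem hk, List.getElem?_eq_getElem hk2,
      Option.getD_some]

-- ===== VERDICT (by name: the statement is the Claim_ definition above) =====
theorem phone_calls_brute_force_spec : Claim_equal_phone_calls_brute_force := by
  unfold Claim_equal_phone_calls_brute_force
  intro start duration volume _ hpre
  unfold Spec_phone_calls_brute_force
  unfold phone_calls_brute_force phone_calls_brute_force_alt
  rw [pv_end_eq start duration hpre]
  simp only []
  set L := PySem.List.sorted
    (((start.zip (List.zipWith (· + ·) start duration)).zip volume).map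
      (fun p => (p.1.1, p.1.2, p.2))) (fun c => c.1) false with hL
  rw [pvFoldr_alt L]
  have h0 := pv_outer_eq L L.length 0 (by omega) 0
  simp only [Nat.cast_zero, List.drop_zero] at h0
  rw [h0, pv_best_eq_foldl]
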